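/- GENERATED by mk_final_copies.py from the proof of the farm's unit `start_decoder.R5` (farm:start_decoder.R5.1: Lemmas.lean) as the
   re-elaboration sweep compiled it — do not edit. -/
/-
  Unit `start_decoder.R5`: the PURE lemmas (no machine steps) — how the assertion `ResLoop` / `ResCur` of the residue loop is
  carried over the memory changes of this segment (spills into the own frame, the callees' stack, the bit reader's fields of
  `*f`, `f->error`, stores into the `residue_books` block under construction).
-/
import Vorbis.Spec.Units.start_decoder_R5

open X86 X86.User Asan Vorbis Vorbis.Spec Vorbis.Spec.StartDecoder

set_option maxRecDepth 4000
set_option maxHeartbeats 4000000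

namespace Vorbis.Spec.start_decoder_R5

/-- **What the segment may write**: the callees' stack `[R − 408, R)`, the spill slots `[R+18H, R+1CH)` and `[R+30H, R+48H)`,
the bit reader's windows of `*f` (with `error`), and the block `C` under construction (`residue_books` of record `i`). -/
def Allowed (g : Ghost) (C : Block) (w : Span) : Prop :=
  (g.R - 408 ≤ w.lo ∧ w.hi ≤ g.R) ∨
  (g.R + 0x18 ≤ w.lo ∧ w.hi ≤ g.R + 0x1c) ∨
  (g.R + 0x30 ≤ w.lo ∧ w.hi ≤ g.R + 0x48) ∨
  (g.f + 48 ≤ w.lo ∧ w.hi ≤ g.f + 56) ∨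
  (g.f + 84 ≤ w.lo ∧ w.hi ≤ g.f + 96) ∨
  (g.f + 136 ≤ w.lo ∧ w.hi ≤ g.f + 144) ∨
  (g.f + 1484 ≤ w.lo ∧ w.hi ≤ g.f + 1749) ∨
  (g.f + 1752 ≤ w.lo ∧ w.hi ≤ g.f + 1784) ∨
  (C.base ≤ w.lo ∧ w.hi ≤ C.base + C.size)

/-- The windows of `*f` that no callee of this segment writes: everything outside `Reader.winsBits`. -/
def WF : Wins := [(0, 48), (56, 84), (96, 136), (144, 1484), (1749, 1752), (1784, 1808)]

/-- **Where the numbers of the frame are**: `R + 1480 = RA`, alignment, the stack region. -/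
theorem frame_numbers {u₀ : State} {g : Ghost} {pc : Word} {A : Arena × List Obj} {v : State} (h : Frame u₀ g pc A v) :
    g.R + 1480 = g.RA ∧ g.R % 8 = 0 ∧ 0x700000 + 408 ≤ g.R ∧ g.RA + 8 ≤ 0x800000 := by
  obtain ⟨h1, h2, h3⟩ := h.ra
  obtain ⟨h4, h5⟩ := h.r_eq
  simp only [depth, steady] at h2 h4
  omega

/-- **Where `*f` is**: above the text, in the data space, and off the function's own stack (it is an object of a caller's
protected frame, which lies above the return address, or no stack object at all). -/
theorem obj_where {u₀ : State} {g : Ghost} {pc : Word} {A : Arena × List Obj} {v : State} (h : Frame u₀ g pc A v)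
    (hh : g.Hand A) :
    0x119d40 ≤ g.f ∧ g.f + 1808 ≤ 0xC00000 ∧ (g.RA + 8 ≤ g.f ∨ g.f + 1808 ≤ 0x700000 ∨ 0x800000 ≤ g.f) := by
  have hsub : ∀ o, o ∈ stackObjs g.frames ++ A.2 → o ∈ stackObjs g.frames' ++ A.2 := by
    intro o ho
    unfold Ghost.frames'
    rw [stackObjs_cons]
    rcases List.mem_append.mp ho with h1 | h2
    · exact List.mem_append_left _ (List.mem_append_right _ h1)
    · exact List.mem_append_right _ h2
  have hobj : LiveIn A.2 g.frames' g.f Off.sizeof.stb_vorbis := hh.obj.mono hsub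
  have hw := hobj.where_ h.shadow h.offText (by decide)
  simp only [Off.sizeof.stb_vorbis] at hw
  refine ⟨hw.1, hw.2.1, ?_⟩
  obtain ⟨o, ho, k1, k2⟩ := hh.obj
  simp only [Off.sizeof.stb_vorbis] at k2
  rcases List.mem_append.mp ho with hs | hoth
  · left
    unfold stackObjs at hs
    obtain ⟨bF, hbF, hin⟩ := List.mem_flatMap.mp hs
    have hbF' : bF ∈ g.frames' := List.mem_cons_of_mem _ hbF
    obtain ⟨a1, a2, _, _, _⟩ := h.shadow.stack.active bF hbF'
    have hg := FrameLayout.objsAt_gran a1 a2 hin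
    have hc := h.callers bF hbF
    have : o.gLo = o.base / 8 := rfl
    omega
  · have := h.shadow.off o hoth
    unfold OffStack at this
    omega

/-- **The agreement of two memories that every clause of the loop's assertion is carried by.** -/
structure Agree (g : Ghost) (Ai : Arena) (mem mem' : Mem) : Prop where
  /-- the fields of `*f` outside the bit reader's windows -/
  obj : ObjEq WF mem g.f mem' g.f
  /-- every block of the arena at the head of the iteration -/
  kept : AllKept Ai.Blk mem mem'
  /-- the frame constants below the slot of `k` -/
  stk1 : Mem.EqOn (g.R + 8) (g.R + 0x18) mem mem'
  /-- ONE20, Z24, the slot of `longest_floorlist` -/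
  stk2 : Mem.EqOn (g.R + 0x1c) (g.R + 0x30) mem mem'
  /-- the saved registers and the return address -/
  stk3 : Mem.EqOn (g.R + 0x598) (g.R + 0x5d0) mem mem'
  /-- the shadow -/
  shadow : Mem.EqOn 0xC00000 0xE00000 mem mem'
  /-- the image's text -/
  text : Mem.EqOn L.textLo L.textHi mem mem'
  /-- the global `log2_4` -/
  log2 : (Block.mk Vorbis.Globals.log2_4.beg Vorbis.Globals.log2_4.size).Kept mem mem'
  /-- inside the function's footprint -/
  foot : Mem.SameExcept (footprint g) mem mem'

/-- `log2_4` is the third registered global (one of the fixed objects of the run's block predicate). -/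
theorem log2_mem : (Block.mk Vorbis.Globals.log2_4.beg Vorbis.Globals.log2_4.size) ∈ globalBlocks := by
  show (Block.mk 0x120640 16) ∈ globalBlocks
  unfold globalBlocks
  exact List.mem_cons_of_mem _ (List.mem_cons_of_mem _ List.mem_cons_self)

/-- The numbers every transport needs: the frame, where `*f` is. -/
structure Nums (g : Ghost) : Prop where
  ra : g.R + 1480 = g.RA
  r8 : g.R % 8 = 0
  lo : 0x700000 + 408 ≤ g.R
  hi : g.RA + 8 ≤ 0x800000
  f_lo : 0x119d40 ≤ g.f
  f_hi : g.f + 1808 ≤ 0xC00000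
  f_off : g.RA + 8 ≤ g.f ∨ g.f + 1808 ≤ 0x700000 ∨ 0x800000 ≤ g.f

/-- The numbers, from the common part of a cut point. -/
theorem Nums.of_frame {u₀ : State} {g : Ghost} {pc : Word} {A : Arena × List Obj} {v : State} (h : Frame u₀ g pc A v)
    (hh : g.Hand A) : Nums g := by
  obtain ⟨h1, h2, h3, h4⟩ := frame_numbers h
  obtain ⟨h5, h6, h7⟩ := obj_where h hh
  exact ⟨h1, h2, h3, h4, h5, h6, h7⟩

/-- **THE AGREEMENT from a footprint whose windows are all `Allowed`.** `C` is the block under construction (allocated since the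
arena `Ai` at the head of the iteration). -/
theorem agree_allowed {g : Ghost} {Ai : Arena} {A : Arena × List Obj} {C : Block} {mem mem' : Mem} {spans : List Span}
    (hn : Nums g) (hh : g.Hand A) (ha : ArenaOK A.1 A.2 mem g.f) (hok : BlkOK (g.Blk A)) (hext0 : g.A0.1.Extends A.1)
    (hext : Ai.Extends A.1) (hC : Since Ai A.1 C) (hs : Mem.SameExcept spans mem mem')
    (hal : ∀ w, w ∈ spans → Allowed g C w) : Agree g Ai mem mem' := by
  obtain ⟨n1, n2, n3, n4, n5, n6, n7⟩ := hn
  have hCin := arena_inside ha hC.1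
  have hCstk := ha.blk_off_stack hC.1
  have hb := ha.bounds
  have htext : L.textHi ≤ A.1.B := hh.arenaText
  have etext : L.textHi = 0x119d40 := rfl
  have hout := hh.objOut
  simp only [Off.sizeof.stb_vorbis] at hout
  -- `*f` and the global `log2_4` do not meet
  have hlog : (objBlock g.f).disjoint (Block.mk Vorbis.Globals.log2_4.beg Vorbis.Globals.log2_4.size) := by
    have m1 : g.Blk A (objBlock g.f) := runBlk_extra List.mem_cons_self
    have m2 : g.Blk A (Block.mk Vorbis.Globals.log2_4.beg Vorbis.Globals.log2_4.size) :=
      runBlk_extra (List.mem_cons_of_mem _ (List.mem_cons_of_mem _ (List.mem_cons_of_mem _ log2_mem)))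
    rcases hok.apart _ _ m1 m2 with e | hd
    · exfalso
      have := congrArg Block.size e
      simp only [objBlock, Off.sizeof.stb_vorbis, Vorbis.Globals.log2_4] at this
      omega
    · exact hd
  simp only [vblock, Off.sizeof.stb_vorbis, Vorbis.Globals.log2_4] at hlog
  have hlogC := hh.outside _ (List.mem_cons_of_mem _ (List.mem_cons_of_mem _ log2_mem))
  simp only [Vorbis.Globals.log2_4] at hlogC
  refine ⟨?_, ?_, ?_, ?_, ?_, ?_, ?_, ?_, ?_⟩
  · -- the fields of `*f`
    apply ObjEq.of_sameExcept hs
    · intro w hw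
      simp only [WF, List.mem_cons, List.mem_nil_iff, or_false] at hw
      rcases hw with rfl | rfl | rfl | rfl | rfl | rfl <;> simp only [] <;> omega
    · intro w hw s hsp
      have := hal s hsp
      unfold Allowed at this
      simp only [WF, List.mem_cons, List.mem_nil_iff, or_false] at hw
      rcases hw with rfl | rfl | rfl | rfl | rfl | rfl <;> simp only [] <;> omega
  · -- the blocks of `Ai`
    intro B hB
    have hBA : A.1.Blk B := hB.mono hext
    have hBin := arena_inside ha hBA
    have hBstk := ha.blk_off_stack hBA
    have hd := ha.old_disjoint_since hext hB hC
    simp only [vblock] at hd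
    apply Block.Kept.of_sameExcept hs
    · intro w hw
      have := hal w hw
      unfold Allowed at this
      omega
    · exact ha.blkOK.no_wrap hBA
  · apply hs.eqOn
    intro w hw
    have := hal w hw
    unfold Allowed at this
    omega
  · apply hs.eqOn
    intro w hw
    have := hal w hw
    unfold Allowed at this
    omega
  · apply hs.eqOn
    intro w hw
    have := hal w hw
    unfold Allowed at this
    omega
  · apply hs.eqOn
    intro w hw
    have := hal w hw
    unfold Allowed at this
    omega
  · apply hs.eqOn
    intro w hw
    have := hal w hw
    unfold Allowed at this
    have e2 : L.textLo = 0x100000 := rfl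
    omega
  · apply Block.Kept.of_sameExcept hs
    · intro w hw
      have := hal w hw
      unfold Allowed at this
      simp only [Vorbis.Globals.log2_4]
      omega
    · simp only [Vorbis.Globals.log2_4]
      omega
  · -- inside the footprint
    apply hs.mono
    intro w hw a h1 h2
    have := hal w hw
    unfold Allowed at this
    have eB := hext0.B
    have eL := hext0.L
    simp only [footprint, writes, List.mem_cons, exists_eq_or_imp, vblock, Off.sizeof.stb_vorbis, depth]
    have ef : (g.e.reg .rdi).toNat = g.f := rfl
    have eR : (g.e.reg .rsp).toNat = g.RA := rfl
    rw [ef]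
    omega

/-- `codebook_count` … `residue_config` lie in the fourth window of `WF`. -/
theorem wf_mid (off n : Nat) (h1 : 144 ≤ off) (h2 : off + n ≤ 1484) : InWins WF off n :=
  InWins.of_mem (144, 1484) (by decide) h1 h2

/-- **RES(i) with the ages of its blocks, carried**: the fields of `*f` it reads are the same, every block of `Ai` is kept
(`residue_config`, the finished records' blocks, the codebooks block are blocks of `Ai`). -/
theorem carry_res {A6 A6c Ai A : Arena} {mem mem' : Mem} {f i : Nat} (h : ResTrans A6 A6c Ai A mem f i)
    (he : ObjEq WF mem f mem' f) (hk : AllKept Ai.Blk mem mem')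
    (hcbB : Ai.Blk ⟨stb_vorbis.codebooks mem f, Off.sizeof.Codebook * (stb_vorbis.codebook_count mem f).toNat⟩) :
    ResTrans A6 A6c Ai A mem' f i := by
  have ecount : stb_vorbis.residue_count mem' f = stb_vorbis.residue_count mem f := by
    simp only [vacc, voff]
    exact he.i32 320 (wf_mid 320 4 (by omega) (by omega))
  have econf : stb_vorbis.residue_config mem' f = stb_vorbis.residue_config mem f := by
    simp only [vacc, voff]
    exact he.u64 456 (wf_mid 456 8 (by omega) (by omega))
  have eat : ∀ i, stb_vorbis.residue_config_at mem' f i = stb_vorbis.residue_config_at mem f i := by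
    intro i
    unfold stb_vorbis.residue_config_at
    rw [econf]
  have hconf := hk _ (h.R2.1.mono h.ext6c)
  have hcb := hk _ hcbB
  have h1 := h.R1
  have hle := h.n_le
  refine ⟨h.ext6, h.ext6c, h.exti, ?_, ?_, ?_, ?_, ?_⟩
  · rw [ecount]
    exact h.n_le
  · rw [ecount]
    exact h.R1
  · rw [ecount, econf]
    exact h.R2
  · intro i' hi
    have e : stb_vorbis.residue_types mem' f i' = stb_vorbis.residue_types mem f i' := by
      simp only [vacc, voff]
      exact he.u16_at (324 + 2 * i') (wf_mid _ 2 (by omega) (by omega)) (by omega) (by omega)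
    rw [e]
    exact h.R3 i' hi
  · intro i' hi
    rw [eat i']
    have hrec := h.record i' hi
    have h7 := hrec.R7
    have hr : (Block.mk (stb_vorbis.residue_config_at mem f i') Off.sizeof.Residue).Kept mem mem' := by
      apply hconf.mono
      · simp only [vacc, voff]
        omega
      · simp only [vacc, voff] at h1 hle ⊢
        omega
    have hcbk : (Block.mk (Residue.cbk mem f (stb_vorbis.residue_config_at mem f i')) 8).Kept mem mem' := by
      apply hcb.mono
      · simp only [vacc, voff]
        omega
      · simp only [vacc, voff] at h7 ⊢
        omega
    have hrd := ResidueReads.of_kept (he.sub (by decide)) hr hcbk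
    apply hrec.frame hrd
    · intro B hO
      cases hO with
      | books => exact hk _ hrec.R8.1
      | classdata => exact hk _ hrec.R8a.1
      | row q hq => exact hk _ (hrec.R8a_row q hq).1
    · intro B _ hB
      exact hB

/-- The record at `residue_config + 32·i'`, `i' < residue_count`, is kept when the block `residue_config` is. -/
theorem record_kept {A6 A6c Ai A : Arena} {mem mem' : Mem} {f i : Nat} (h : ResTrans A6 A6c Ai A mem f i)
    (hk : AllKept Ai.Blk mem mem') (i' : Nat) (hi : (i' : Int) < stb_vorbis.residue_count mem f) :
    (Block.mk (stb_vorbis.residue_config_at mem f i') Off.sizeof.Residue).Kept mem mem' := by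
  have hconf := hk _ (h.R2.1.mono h.ext6c)
  have h1 := h.R1
  apply hconf.mono
  · simp only [vacc, voff]
    omega
  · simp only [vacc, voff] at h1 hi ⊢
    omega

/-- **The zero tail of `residue_config`, carried.** -/
theorem carry_zero {A6 A6c Ai A : Arena} {mem mem' : Mem} {f i z : Nat} (h : ResTrans A6 A6c Ai A mem f i)
    (hz : ResidueZeroFrom mem f z) (he : ObjEq WF mem f mem' f) (hk : AllKept Ai.Blk mem mem') :
    ResidueZeroFrom mem' f z := by
  have ecount : stb_vorbis.residue_count mem' f = stb_vorbis.residue_count mem f := by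
    simp only [vacc, voff]
    exact he.i32 320 (wf_mid 320 4 (by omega) (by omega))
  have econf : stb_vorbis.residue_config mem' f = stb_vorbis.residue_config mem f := by
    simp only [vacc, voff]
    exact he.u64 456 (wf_mid 456 8 (by omega) (by omega))
  intro i' hi' hlt
  rw [ecount] at hlt
  have eat : stb_vorbis.residue_config_at mem' f i' = stb_vorbis.residue_config_at mem f i' := by
    unfold stb_vorbis.residue_config_at
    rw [econf]
  rw [eat]
  have hr := record_kept h hk i' hlt
  have ecd : Residue.classdata mem' (stb_vorbis.residue_config_at mem f i')
      = Residue.classdata mem (stb_vorbis.residue_config_at mem f i') := by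
    simp only [Residue.classdata, Mem.ptr_eq, voff]
    exact hr.u64 _ (by simp only []; omega) (by simp only [voff]; omega)
  rw [ecd]
  exact hz i' hi' hlt

/-- **What record `i` reads is the same** in a memory that agrees on `*f`'s fields and keeps every block of `Ai`. -/
theorem cur_reads {g : Ghost} {A6 A6c Ai A : Arena} {P : Block → Prop} {mem mem' : Mem} {i st : Nat}
    (h : ResTrans A6 A6c Ai A mem g.f i) (hc : ResCur g P P mem i st)
    (he : ObjEq WF mem g.f mem' g.f) (hk : AllKept Ai.Blk mem mem')
    (hcbB : Ai.Blk ⟨stb_vorbis.codebooks mem g.f, Off.sizeof.Codebook * (stb_vorbis.codebook_count mem g.f).toNat⟩) :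
    resAt g mem' i = resAt g mem i ∧ ResidueReads mem g.f mem' g.f (resAt g mem i) := by
  have econf : stb_vorbis.residue_config mem' g.f = stb_vorbis.residue_config mem g.f := by
    simp only [vacc, voff]
    exact he.u64 456 (wf_mid 456 8 (by omega) (by omega))
  have eat : resAt g mem' i = resAt g mem i := by
    unfold resAt stb_vorbis.residue_config_at
    rw [econf]
  refine ⟨eat, ?_⟩
  have hr := record_kept h hk i hc.lt
  have h7 := hc.R7
  have hcb := hk _ hcbB
  have hcbk : (Block.mk (Residue.cbk mem g.f (resAt g mem i)) 8).Kept mem mem' := by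
    apply hcb.mono
    · simp only [vacc, voff]
      omega
    · simp only [vacc, voff] at h7 ⊢
      omega
  exact ResidueReads.of_kept (he.sub (by decide)) hr hcbk

/-- **Record `i` under construction at stage 5, carried.** -/
theorem carry_cur {g : Ghost} {A6 A6c Ai A : Arena} {P : Block → Prop} {mem mem' : Mem} {i : Nat}
    (h : ResTrans A6 A6c Ai A mem g.f i) (hc : ResCur g P P mem i 5)
    (he : ObjEq WF mem g.f mem' g.f) (hk : AllKept Ai.Blk mem mem')
    (hcbB : Ai.Blk ⟨stb_vorbis.codebooks mem g.f, Off.sizeof.Codebook * (stb_vorbis.codebook_count mem g.f).toNat⟩) :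
    ResCur g P P mem' i 5 := by
  obtain ⟨eat, hrd⟩ := cur_reads h hc he hk hcbB
  have ecount : stb_vorbis.residue_count mem' g.f = stb_vorbis.residue_count mem g.f := by
    simp only [vacc, voff]
    exact he.i32 320 (wf_mid 320 4 (by omega) (by omega))
  have hlt := hc.lt
  have h1 := h.R1
  have etype : stb_vorbis.residue_types mem' g.f i = stb_vorbis.residue_types mem g.f i := by
    simp only [vacc, voff]
    exact he.u16_at (324 + 2 * i) (wf_mid _ 2 (by omega) (by omega)) (by omega) (by omega)
  refine ⟨?_, ?_, ?_, ?_, ?_, ?_, ?_, ?_, ?_⟩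
  · rw [ecount]
    exact hc.lt
  · rw [etype]
    exact hc.R3
  · rw [eat, hrd.begin, hrd.end_]
    exact hc.R4
  · rw [eat, hrd.part_size]
    exact hc.R5
  · rw [eat, hrd.classifications]
    exact hc.R6
  · rw [eat, hrd.classbook, hrd.codebook_count]
    exact hc.R7
  · intro h5
    rw [eat, hrd.residue_books, hrd.classifications]
    exact hc.R8 h5
  · intro h6
    omega
  · intro h7
    omega

/-- **The common part of a cut point, carried** to another state whose memory agrees. -/
theorem carry_frame {u₀ : State} {g : Ghost} {pc pc' : Word} {Ai : Arena} {A : Arena × List Obj} {v s : State}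
    (h : Frame u₀ g pc A v) (hn : Nums g) (hag : Agree g Ai v.mem s.mem) (hrip : s.rip = pc')
    (hrsp : s.reg .rsp = addr g.R) (hinv : abiInv s) : Frame u₀ g pc' A s := by
  obtain ⟨n1, n2, n3, n4, n5, n6, n7⟩ := hn
  have hR : g.R + 0x18 ≤ 2 ^ 64 := by omega
  have hR3 : g.R + 0x5d0 ≤ 2 ^ 64 := by omega
  refine ⟨h.entry, hrip, hrsp, ?_, ?_, ?_, ?_, ?_, ?_, ?_, ?_, ?_, hinv, ?_, h.offText, h.ext, h.callers, ?_, ?_⟩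
  · rw [hag.stk1.u64 (g.R + 8) (by omega) (by omega) hR]
    exact h.shadowIdx
  · rw [hag.stk3.u64 _ (by omega) (by omega) hR3]
    exact h.saved_rbx
  · rw [hag.stk3.u64 _ (by omega) (by omega) hR3]
    exact h.saved_rbp
  · rw [hag.stk3.u64 _ (by omega) (by omega) hR3]
    exact h.saved_r12
  · rw [hag.stk3.u64 _ (by omega) (by omega) hR3]
    exact h.saved_r13
  · rw [hag.stk3.u64 _ (by omega) (by omega) hR3]
    exact h.saved_r14
  · rw [hag.stk3.u64 _ (by omega) (by omega) hR3]
    exact h.saved_r15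
  · rw [hag.stk3.u64 _ (by omega) (by omega) hR3]
    exact h.saved_ra
  · exact Mem.EqOn.trans h.code hag.text
  · exact h.shadow.untouched hag.shadow
  · intro j hj
    have e := hag.log2.u8 (Vorbis.Globals.log2_4.beg + j) (by simp only []; omega)
      (by simp only [Vorbis.Globals.log2_4]; omega)
    have e' : s.mem.readLE (UInt64.ofNat (Vorbis.Globals.log2_4.beg + j)) 1
        = v.mem.readLE (UInt64.ofNat (Vorbis.Globals.log2_4.beg + j)) 1 := e
    rw [e']
    exact h.sh7 j hj
  · exact h.same.trans hag.foot

/-- **The point inside the residue section, carried.** -/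
theorem carry_mid {g : Ghost} {A6 Ai : Arena} {A : Arena × List Obj} {mem mem' : Mem}
    (h : Mid g 6 6 7 A6 A mem) (hn : Nums g) (hag : Agree g Ai mem mem') (hext6 : A6.Extends Ai)
    (hbits : Bits (g.Blk A) g.len mem' g.f) : Mid g 6 6 7 A6 A mem' := by
  obtain ⟨n1, n2, n3, n4, n5, n6, n7⟩ := hn
  have hR : g.R + 0x18 ≤ 2 ^ 64 := by omega
  have hR2 : g.R + 0x30 ≤ 2 ^ 64 := by omega
  apply h.frame
  · exact hag.obj.sub (by decide)
  · intro B hB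
    exact hag.kept B (hB.mono hext6)
  · obtain ⟨c1, c2, c3, c4, c5⟩ := h.consts
    refine ⟨c1, ?_, ?_, ?_, ?_⟩
    · rw [hag.stk1.u64 (g.R + 8) (by omega) (by omega) hR]
      exact c2
    · rw [hag.stk2.u32 (g.R + 0x20) (by omega) (by omega) hR2]
      exact c3
    · intro hk
      rw [hag.stk1.u8 (g.R + 0x10) (by omega) (by omega) hR]
      exact c4 hk
    · intro hk1 hk2
      rw [hag.stk2.u32 (g.R + 0x24) (by omega) (by omega) hR2]
      exact c5 hk1 hk2
  · intro _ _
    exact hag.stk2.i32 (g.R + 0x28) (by omega) (by omega) hR2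
  · exact hag.shadow
  · exact h.arena.transfer (hag.obj.sub (by decide))
  · exact hbits

/-- **A window off every arena block**: the callees' stack, the spill slots, the bit reader's windows of `*f` (with `error`). -/
def OffArena (g : Ghost) (w : Span) : Prop :=
  (g.R - 408 ≤ w.lo ∧ w.hi ≤ g.R) ∨
  (g.R + 0x18 ≤ w.lo ∧ w.hi ≤ g.R + 0x1c) ∨
  (g.R + 0x30 ≤ w.lo ∧ w.hi ≤ g.R + 0x48) ∨
  (g.f + 48 ≤ w.lo ∧ w.hi ≤ g.f + 56) ∨
  (g.f + 84 ≤ w.lo ∧ w.hi ≤ g.f + 96) ∨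
  (g.f + 136 ≤ w.lo ∧ w.hi ≤ g.f + 144) ∨
  (g.f + 1484 ≤ w.lo ∧ w.hi ≤ g.f + 1749) ∨
  (g.f + 1752 ≤ w.lo ∧ w.hi ≤ g.f + 1784)

/-- A window off the arena is allowed, whatever the block under construction. -/
theorem OffArena.allowed {g : Ghost} {w : Span} (h : OffArena g w) (C : Block) : Allowed g C w := by
  unfold OffArena at h
  unfold Allowed
  omega

/-- **The loop-head assertion of the two loops of the segment** (memory part): the residue loop's invariant, record `i` at stage 5,
and R8c for the slots before `[j][k]`. -/
structure Head (u₀ : State) (g : Ghost) (i : Nat) (A6 A6c Ai : Arena) (A : Arena × List Obj) (pc : Word) (j k : Nat)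
    (s : State) : Prop where
  loop : ResLoop u₀ g pc i i A6 A6c Ai A s
  cur : ResCur g (Since Ai A.1) (Since Ai A.1) s.mem i 5
  books : ResBooksUpTo s.mem g.f (resAt g s.mem i) j k
  /-- the row counter is at most `classifications` … -/
  j_le : j ≤ Residue.classifications s.mem (resAt g s.mem i)
  /-- … and inside a row it is below -/
  k_pos : 0 < k → j < Residue.classifications s.mem (resAt g s.mem i)

/-- The codebooks block is a block of the arena at the head of the iteration. -/
theorem Head.cbB {u₀ : State} {g : Ghost} {i : Nat} {A6 A6c Ai : Arena} {A : Arena × List Obj} {pc : Word} {j k : Nat}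
    {s : State} (h : Head u₀ g i A6 A6c Ai A pc j k s) :
    Ai.Blk ⟨stb_vorbis.codebooks s.mem g.f, Off.sizeof.Codebook * (stb_vorbis.codebook_count s.mem g.f).toNat⟩ := by
  have hmid := h.loop.mid
  have hcb := (hmid.own.cb0 (by omega)).ok (hmid.own.nonnull (by omega))
  exact hcb.F2.mono (h.loop.res.ext6.trans h.loop.res.ext6c)

/-- The block under construction: `residue_books` of record `i`. -/
def bookBlock (g : Ghost) (mem : Mem) (i : Nat) : Block :=
  ⟨Residue.residue_books mem (resAt g mem i), 16 * Residue.classifications mem (resAt g mem i)⟩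

/-- **THE TRANSPORT OVER A FOOTPRINT OFF THE ARENA** (a callee, the spills of a walk): the whole assertion is carried to the state
`s'`, given `Bits` there. -/
theorem Head.carry {u₀ : State} {g : Ghost} {i : Nat} {A6 A6c Ai : Arena} {A : Arena × List Obj} {pc pc' : Word} {j k : Nat}
    {s s' : State} {spans : List Span} (h : Head u₀ g i A6 A6c Ai A pc j k s)
    (hs : Mem.SameExcept spans s.mem s'.mem) (hoff : ∀ w, w ∈ spans → OffArena g w)
    (hbits : Bits (g.Blk A) g.len s'.mem g.f) (hrip : s'.rip = pc') (hrsp : s'.reg .rsp = addr g.R) (hinv : abiInv s') :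
    Head u₀ g i A6 A6c Ai A pc' j k s' := by
  have hn := Nums.of_frame h.loop.frame h.loop.hand
  have hmid := h.loop.mid
  have hC : Since Ai A.1 (bookBlock g s.mem i) := h.cur.R8 (by omega)
  have hag : Agree g Ai s.mem s'.mem :=
    agree_allowed hn h.loop.hand hmid.arena hmid.env.ok h.loop.frame.ext h.loop.res.exti hC hs (fun w hw => (hoff w hw).allowed _)
  have hcbB := h.cbB
  obtain ⟨eat, hrd⟩ := cur_reads h.loop.res h.cur hag.obj hag.kept hcbB
  -- the block under construction is kept: the footprint is off the arena
  have hCk : (bookBlock g s.mem i).Kept s.mem s'.mem := by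
    obtain ⟨n1, n2, n3, n4, n5, n6, n7⟩ := hn
    have ha := hmid.arena
    have hCin := arena_inside ha hC.1
    have hCstk := ha.blk_off_stack hC.1
    have hout := h.loop.hand.objOut
    simp only [Off.sizeof.stb_vorbis] at hout
    apply Block.Kept.of_sameExcept hs
    · intro w hw
      have := hoff w hw
      unfold OffArena at this
      omega
    · exact ha.blkOK.no_wrap hC.1
  have hcls := h.cur.R6
  refine ⟨⟨?_, h.loop.hand, ?_, ?_, ?_, ?_⟩, ?_, ?_, ?_, ?_⟩
  · exact carry_frame h.loop.frame hn hag hrip hrsp hinv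
  · exact carry_mid hmid hn hag (h.loop.res.ext6.trans h.loop.res.ext6c) hbits
  · have ecount : stb_vorbis.residue_count s'.mem g.f = stb_vorbis.residue_count s.mem g.f := by
      simp only [vacc, voff]
      exact hag.obj.i32 320 (wf_mid 320 4 (by omega) (by omega))
    rw [ecount]
    exact h.loop.i_le
  · exact carry_res h.loop.res hag.obj hag.kept hcbB
  · exact carry_zero h.loop.res h.loop.zero hag.obj hag.kept
  · exact carry_cur h.loop.res h.cur hag.obj hag.kept hcbB
  · rw [eat]
    apply h.books.keep hrd.codebook_count
    intro j' k' hk' hlt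
    have hjle := h.j_le
    have hkpos := h.k_pos
    exact Residue.book_kept hrd hCk (by omega) hk'
  · rw [eat, hrd.classifications]
    exact h.j_le
  · rw [eat, hrd.classifications]
    exact h.k_pos

/-- **THE TRANSPORT OVER THE STORE OF SLOT `[j][k]`** (either arm of line 4066: the tested byte, or `−1`): the assertion with the
slot counted. `x` is the stored word; `hnew`: its signed 16-bit value is `−1` or a codebook number. -/
theorem Head.store {u₀ : State} {g : Ghost} {i : Nat} {A6 A6c Ai : Arena} {A : Arena × List Obj} {pc pc' : Word} {j k : Nat}
    {s s' : State} (h : Head u₀ g i A6 A6c Ai A pc j k s) (hk : k < 8)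
    (hj : j < Residue.classifications s.mem (resAt g s.mem i)) (x : Nat)
    (hmem : s'.mem = s.mem.writeLE (addr (Residue.residue_books s.mem (resAt g s.mem i) + 16 * j + 2 * k)) 2 x)
    (hnew : BookOK s.mem g.f (sint16 (x % 2 ^ 16)))
    (hrip : s'.rip = pc') (hrsp : s'.reg .rsp = addr g.R) (hinv : abiInv s') :
    Head u₀ g i A6 A6c Ai A pc' j (k + 1) s' := by
  have hn := Nums.of_frame h.loop.frame h.loop.hand
  have hmid := h.loop.mid
  have hC : Since Ai A.1 (bookBlock g s.mem i) := h.cur.R8 (by omega)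
  have ha := hmid.arena
  have hCin := arena_inside ha hC.1
  have hb := ha.bounds
  simp only [bookBlock] at hCin
  generalize hrbdef : Residue.residue_books s.mem (resAt g s.mem i) = rb at *
  generalize hclsdef : Residue.classifications s.mem (resAt g s.mem i) = cls at *
  have ea : (addr (rb + 16 * j + 2 * k)).toNat = rb + 16 * j + 2 * k := toNat_addr _ (by omega)
  have hs : Mem.SameExcept [⟨rb + 16 * j + 2 * k, rb + 16 * j + 2 * k + 2⟩] s.mem s'.mem := by
    rw [hmem]
    apply Mem.SameExcept.writeLE
    · rw [ea]
      omega
    · refine ⟨_, List.mem_cons_self, ?_, ?_⟩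
      · rw [ea]
        exact Nat.le_refl _
      · rw [ea]
        exact Nat.le_refl _
  have hal : ∀ w, w ∈ [(⟨rb + 16 * j + 2 * k, rb + 16 * j + 2 * k + 2⟩ : Span)] → Allowed g (bookBlock g s.mem i) w := by
    intro w hw
    rw [List.mem_singleton.mp hw]
    unfold Allowed
    simp only [bookBlock, hrbdef, hclsdef]
    omega
  have hag : Agree g Ai s.mem s'.mem :=
    agree_allowed hn h.loop.hand ha hmid.env.ok h.loop.frame.ext h.loop.res.exti hC hs hal
  have hcbB := h.cbB
  obtain ⟨eat, hrd⟩ := cur_reads h.loop.res h.cur hag.obj hag.kept hcbB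
  have hrb' : Residue.residue_books s'.mem (resAt g s.mem i) = rb := by
    rw [hrd.residue_books, hrbdef]
  -- `Bits`: the store is off `*f`
  have hbits : Bits (g.Blk A) g.len s'.mem g.f := by
    obtain ⟨n1, n2, n3, n4, n5, n6, n7⟩ := hn
    have hout := h.loop.hand.objOut
    simp only [Off.sizeof.stb_vorbis] at hout
    apply hmid.bits.frame_fields
    rw [hmem]
    exact Bits.SameFields.of_writeLE s.mem g.f _ 2 x (by omega) (by omega) (by omega) (by omega) (by omega)
  refine ⟨⟨?_, h.loop.hand, ?_, ?_, ?_, ?_⟩, ?_, ?_, ?_, ?_⟩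
  · exact carry_frame h.loop.frame hn hag hrip hrsp hinv
  · exact carry_mid hmid hn hag (h.loop.res.ext6.trans h.loop.res.ext6c) hbits
  · have ecount : stb_vorbis.residue_count s'.mem g.f = stb_vorbis.residue_count s.mem g.f := by
      simp only [vacc, voff]
      exact hag.obj.i32 320 (wf_mid 320 4 (by omega) (by omega))
    rw [ecount]
    exact h.loop.i_le
  · exact carry_res h.loop.res hag.obj hag.kept hcbB
  · exact carry_zero h.loop.res h.loop.zero hag.obj hag.kept
  · exact carry_cur h.loop.res h.cur hag.obj hag.kept hcbB
  · rw [eat]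
    rw [hmem] at hrb' ⊢
    apply h.books.step
    · rw [← hmem]
      exact hrd.codebook_count
    · intro j' k' hk' hlt
      exact Residue.book_writeLE_other s.mem _ rb j k j' k' x hrbdef hrb' hk hk' (by omega) (by omega) (by omega)
    · rw [Residue.book_writeLE_same s.mem _ rb j k x hrb']
      unfold BookOK at hnew ⊢
      rw [← hmem, hrd.codebook_count]
      exact hnew
  · rw [eat, hrd.classifications, hclsdef]
    omega
  · intro _
    rw [eat, hrd.classifications, hclsdef]
    exact hj

/-- **Where everything the segment touches lies**, as arithmetic for the walker's side conditions: the record `r`, the block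
`rb` of `16·cls` bytes, `*f`; the loop bounds. -/
structure Where (g : Ghost) (r rb cls : Nat) : Prop where
  r_lo : 0x119d40 ≤ r
  r_hi : r + 32 ≤ 0xC00000
  r_stk : r + 32 ≤ 0x700000 ∨ 0x800000 ≤ r
  cls_lo : 1 ≤ cls
  cls_hi : cls ≤ 64
  rb_lo : 0x119d40 ≤ rb
  rb_hi : rb + 16 * cls ≤ 0xC00000
  rb_stk : rb + 16 * cls ≤ 0x700000 ∨ 0x800000 ≤ rb
  rb_r : rb + 16 * cls ≤ r ∨ r + 32 ≤ rb
  rb_f : rb + 16 * cls ≤ g.f ∨ g.f + 1808 ≤ rb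
  r_f : r + 32 ≤ g.f ∨ g.f + 1808 ≤ r

variable {u₀ : State} {g : Ghost} {i : Nat} {A6 A6c Ai : Arena} {A : Arena × List Obj} {pc : Word} {j k : Nat} {s : State}

/-- The block `residue_config` is a block of the present arena. -/
theorem Head.confB (h : Head u₀ g i A6 A6c Ai A pc j k s) :
    A.1.Blk ⟨stb_vorbis.residue_config s.mem g.f, Off.sizeof.Residue * (stb_vorbis.residue_count s.mem g.f).toNat⟩ :=
  ((h.loop.res.R2.1.mono h.loop.res.ext6c).mono h.loop.res.exti)

/-- The record `i` lies inside the block `residue_config`. -/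
theorem Head.rec_in (h : Head u₀ g i A6 A6c Ai A pc j k s) :
    stb_vorbis.residue_config s.mem g.f ≤ resAt g s.mem i ∧
      resAt g s.mem i + 32 ≤ stb_vorbis.residue_config s.mem g.f
        + Off.sizeof.Residue * (stb_vorbis.residue_count s.mem g.f).toNat := by
  have hlt := h.cur.lt
  have h1 := h.loop.res.R1
  unfold resAt
  simp only [vacc, voff] at hlt h1 ⊢
  omega

/-- **The layout facts at a loop head.** -/
theorem Head.where_ (h : Head u₀ g i A6 A6c Ai A pc j k s) :
    Where g (resAt g s.mem i) (Residue.residue_books s.mem (resAt g s.mem i))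
      (Residue.classifications s.mem (resAt g s.mem i)) := by
  have hn := Nums.of_frame h.loop.frame h.loop.hand
  obtain ⟨n1, n2, n3, n4, n5, n6, n7⟩ := hn
  have hmid := h.loop.mid
  have ha := hmid.arena
  have hC : Since Ai A.1 (bookBlock g s.mem i) := h.cur.R8 (by omega)
  have hCin := arena_inside ha hC.1
  have hCstk := ha.blk_off_stack hC.1
  have hB := h.confB
  have hBin := arena_inside ha hB
  have hBstk := ha.blk_off_stack hB
  have hrec := h.rec_in
  have hd := ha.old_disjoint_since h.loop.res.exti (h.loop.res.R2.1.mono h.loop.res.ext6c) hC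
  have hb := ha.bounds
  have htext : L.textHi ≤ A.1.B := h.loop.hand.arenaText
  have etext : L.textHi = 0x119d40 := rfl
  have hout := h.loop.hand.objOut
  have h6 := h.cur.R6
  simp only [Off.sizeof.stb_vorbis] at hout
  simp only [bookBlock, vblock] at hCin hCstk hd
  simp only [] at hBin hBstk
  constructor <;> omega

/-- The live set of the function's body is the live set of its shadow invariant. -/
theorem live_eq (g : Ghost) (A : Arena × List Obj) : g.Live A = Asan.Live (stackObjs g.frames' ++ A.2) := rfl

/-- **Check site: a field of record `i`.** -/
theorem Head.site_rec (h : Head u₀ g i A6 A6c Ai A pc j k s) (off n : Nat) (ho : off + n ≤ 32) (hn : 1 ≤ n) :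
    Site (Asan.Live (stackObjs g.frames' ++ A.2)) (resAt g s.mem i + off) n := by
  have hrec := h.rec_in
  have hL : BlkLive (g.Blk A) (g.Live A) := h.loop.mid.env.live
  apply Site.of_blk hL (runBlk_setup h.confB)
  · simp only []
    omega
  · simp only []
    omega
  · exact hn

/-- **Check site: slot `[j'][k']` of the block under construction.** -/
theorem Head.site_book (h : Head u₀ g i A6 A6c Ai A pc j k s) (j' k' : Nat)
    (hj : j' < Residue.classifications s.mem (resAt g s.mem i)) (hk : k' < 8) :
    Site (Asan.Live (stackObjs g.frames' ++ A.2))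
      (Residue.residue_books s.mem (resAt g s.mem i) + 16 * j' + 2 * k') 2 := by
  have hL : BlkLive (g.Blk A) (g.Live A) := h.loop.mid.env.live
  have hC : Since Ai A.1 (bookBlock g s.mem i) := h.cur.R8 (by omega)
  apply Site.of_blk hL (runBlk_setup hC.1)
  · simp only [bookBlock]
    omega
  · simp only [bookBlock]
    omega
  · omega

/-- **Check site: a field of `*f`.** -/
theorem Head.site_f (h : Head u₀ g i A6 A6c Ai A pc j k s) (off n : Nat) (ho : off + n ≤ 1808) (hn : 1 ≤ n) :
    Site (Asan.Live (stackObjs g.frames' ++ A.2)) (g.f + off) n := by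
  have hL : BlkLive (g.Blk A) (g.Live A) := h.loop.mid.env.live
  exact h.loop.mid.bits.site_field hL off n ho hn rfl

/-- **Check site: `residue_cascade[j']`**, the 64-byte object at `[R + C0H]` of the function's own protected frame. -/
theorem Head.site_casc (h : Head u₀ g i A6 A6c Ai A pc j k s) (j' : Nat) (hj : j' < 64) :
    Site (Asan.Live (stackObjs g.frames' ++ A.2)) (g.R + 0xc0 + j') 1 := by
  have hF : (g.base, Vorbis.Frames.start_decoder) ∈ g.frames' := List.mem_cons_self
  have ho : (⟨g.base + 112, 64, .stack⟩ : Obj) ∈ Vorbis.Frames.start_decoder.objsAt g.base := by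
    unfold FrameLayout.objsAt Vorbis.Frames.start_decoder
    simp only [List.map_cons, List.mem_cons, true_or, or_true]
  have hl := h.loop.frame.shadow.live_frame hF ho
  apply Site.of_block hl
  · show g.base + 112 ≤ g.R + 0xc0 + j'
    unfold Ghost.base
    omega
  · show g.R + 0xc0 + j' + 1 ≤ g.base + 112 + 64
    unfold Ghost.base
    omega
  · omega

/-- A slot of the frame, spelled from the entry stack pointer as the walker does: `[R + k] = [e.rsp − (1480 − k)]`. -/
theorem slot_addr (g : Ghost) (k : Nat) (c : Word) (hra : g.R + 1480 = (g.e.reg .rsp).toNat) (hc : c.toNat + k = 1480) :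
    addr (g.R + k) = g.e.reg .rsp - c := by
  apply (eq_addr _ _ _).symm
  rw [UInt64.toNat_sub_of_le]
  · omega
  · rw [UInt64.le_iff_toNat_le]
    omega

/-- **The loads of the loop heads**: `classifications` and `residue_books` of record `i`, the literal 0 of `[R + 24H]`. -/
theorem Head.loads (h : Head u₀ g i A6 A6c Ai A pc j k s) :
    s.mem.readLE (addr (resAt g s.mem i) + 12) 1 = Residue.classifications s.mem (resAt g s.mem i) ∧
    s.mem.readLE (addr (resAt g s.mem i) + 24) 8 = Residue.residue_books s.mem (resAt g s.mem i) ∧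
    s.mem.readLE (g.e.reg .rsp - 1444) 4 = 0 := by
  have hra : g.R + 1480 = (g.e.reg .rsp).toNat := h.loop.frame.r_eq.1
  refine ⟨?_, ?_, ?_⟩
  · simp only [vfield, vacc, voff]
  · simp only [vfield, vacc, voff]
  · rw [← slot_addr g 0x24 1444 hra (by decide)]
    exact h.loop.mid.consts.z24 (by omega) (by omega)

/-- **The entry of the segment is the head assertion with no slot counted.** -/
theorem Head.of_entry {v : State} (hb : BodyR5 u₀ g i A6 A6c Ai A v) : Head u₀ g i A6 A6c Ai A pc_R5 0 0 v :=
  ⟨hb.loop, hb.cur, ResBooksUpTo.zero _ _ _, Nat.zero_le _, fun h => absurd h (Nat.lt_irrefl 0)⟩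

/-- **The row is finished** (`k = 8`): the next row. -/
theorem Head.next_row (h : Head u₀ g i A6 A6c Ai A pc j 8 s) : Head u₀ g i A6 A6c Ai A pc (j + 1) 0 s := by
  have hlt := h.k_pos (by omega)
  exact ⟨h.loop, h.cur, h.books.next_row, hlt, fun h0 => absurd h0 (Nat.lt_irrefl 0)⟩

/-- **All rows are finished** (`j = classifications`): the entry assertion of segment R6. -/
theorem Head.toR6 (h : Head u₀ g i A6 A6c Ai A pc_R6 j 0 s) (hj : j = Residue.classifications s.mem (resAt g s.mem i))
    (h13 : s.reg .r13 = addr g.f) (h14 : s.reg .r14 = addr i) (hbx : s.reg .rbx = addr (resAt g s.mem i)) :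
    AtR6 u₀ g i s := by
  refine ⟨A6, A6c, Ai, A, h.loop, h13, h14, hbx, ?_⟩
  have hc := h.cur
  refine ⟨hc.lt, hc.R3, hc.R4, hc.R5, hc.R6, hc.R7, fun _ => hc.R8 (by omega), ?_, ?_⟩
  · intro _
    rw [← hj]
    exact h.books
  · intro h7
    omega

/-- **An error exit**: SD.ERR from the head assertion (record `i` still has `classdata = NULL`). -/
theorem Head.failed (h : Head u₀ g i A6 A6c Ai A pc j k s) : Failed g.len g.f (g.Live A) A s.mem := by
  have hd : ResidueDeinitOK A.1.Blk s.mem g.f :=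
    h.loop.res.upTo.deinit_head h.loop.zero (h.loop.mid.own.nonnull (by omega))
  have h2 : H2 (g.Blk A) s.mem g.f := H2.mono (ResidueDeinitOK.h2 hd h.loop.res.R1.2) (fun _ hB => runBlk_setup hB)
  have h3 : H3 (g.Blk A) s.mem g.f := H3.mono (ResidueDeinitOK.h3 hd) (fun _ hB => runBlk_setup hB)
  exact h.loop.mid.failed (by omega) h2 h3 (h.loop.mid.h5_null (by omega) _)

/-- **The epilogue's entry assertion** after `error` returned 0. -/
theorem Head.toERR (h : Head u₀ g i A6 A6c Ai A pc_ERR j k s) (hax : (s.reg .rax).toNat % 2 ^ 32 = 0) : AtERR u₀ g s :=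
  ⟨A, h.loop.frame, h.loop.hand, Or.inl ⟨hax, h.failed⟩⟩

/-- **A window in the function's own stack**: the callees' stack, the spill slots. -/
def Stk (g : Ghost) (w : Span) : Prop :=
  (g.R - 408 ≤ w.lo ∧ w.hi ≤ g.R) ∨
  (g.R + 0x18 ≤ w.lo ∧ w.hi ≤ g.R + 0x1c) ∨
  (g.R + 0x30 ≤ w.lo ∧ w.hi ≤ g.R + 0x48)

/-- A stack window is off the arena. -/
theorem Stk.off {g : Ghost} {w : Span} (h : Stk g w) : OffArena g w := by
  unfold Stk at h
  unfold OffArena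
  omega

/-- **What the registers and the loads of the next walk are stated with is the same** after a footprint off the arena: the
address of record `i`, its `classifications`, its `residue_books`, and `codebook_count`. -/
theorem Head.reads_eq {spans : List Span} {s' : State} (h : Head u₀ g i A6 A6c Ai A pc j k s)
    (hs : Mem.SameExcept spans s.mem s'.mem) (hoff : ∀ w, w ∈ spans → OffArena g w) :
    resAt g s'.mem i = resAt g s.mem i ∧
    Residue.classifications s'.mem (resAt g s.mem i) = Residue.classifications s.mem (resAt g s.mem i) ∧
    Residue.residue_books s'.mem (resAt g s.mem i) = Residue.residue_books s.mem (resAt g s.mem i) ∧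
    stb_vorbis.codebook_count s'.mem g.f = stb_vorbis.codebook_count s.mem g.f := by
  have hn := Nums.of_frame h.loop.frame h.loop.hand
  have hmid := h.loop.mid
  have hC : Since Ai A.1 (bookBlock g s.mem i) := h.cur.R8 (by omega)
  have hag : Agree g Ai s.mem s'.mem :=
    agree_allowed hn h.loop.hand hmid.arena hmid.env.ok h.loop.frame.ext h.loop.res.exti hC hs (fun w hw => (hoff w hw).allowed _)
  obtain ⟨eat, hrd⟩ := cur_reads h.loop.res h.cur hag.obj hag.kept h.cbB
  exact ⟨eat, hrd.classifications, hrd.residue_books, hrd.codebook_count⟩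

/-- `Bits` over a footprint in the function's own stack. -/
theorem Head.bits_stk {spans : List Span} {s' : State} (h : Head u₀ g i A6 A6c Ai A pc j k s)
    (hs : Mem.SameExcept spans s.mem s'.mem) (hstk : ∀ w, w ∈ spans → Stk g w) :
    Bits (g.Blk A) g.len s'.mem g.f := by
  obtain ⟨n1, n2, n3, n4, n5, n6, n7⟩ := Nums.of_frame h.loop.frame h.loop.hand
  apply h.loop.mid.bits.frame_fields
  apply Bits.SameFields.of_sameExcept hs
  · intro w hw
    have := hstk w hw
    unfold Stk at this
    omega
  · intro w hw
    have := hstk w hw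
    unfold Stk at this
    omega
  · intro w hw
    have := hstk w hw
    unfold Stk at this
    omega
  · intro w hw
    have := hstk w hw
    unfold Stk at this
    omega

/-- **THE TRANSPORT OVER THE SPILLS AND PUSHES OF A WALK.** -/
theorem Head.carry_stk {spans : List Span} {pc' : Word} {s' : State} (h : Head u₀ g i A6 A6c Ai A pc j k s)
    (hs : Mem.SameExcept spans s.mem s'.mem) (hstk : ∀ w, w ∈ spans → Stk g w)
    (hrip : s'.rip = pc') (hrsp : s'.reg .rsp = addr g.R) (hinv : abiInv s') :
    Head u₀ g i A6 A6c Ai A pc' j k s' :=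
  h.carry hs (fun w hw => (hstk w hw).off) (h.bits_stk hs hstk) hrip hrsp hinv

/-- The live objects inside the function contain those of the callers. -/
theorem callers_sub (g : Ghost) (others : List Obj) (o : Obj) (ho : o ∈ stackObjs g.frames ++ others) :
    o ∈ stackObjs g.frames' ++ others := by
  unfold Ghost.frames'
  rw [stackObjs_cons]
  rcases List.mem_append.mp ho with h1 | h2
  · exact List.mem_append_left _ (List.mem_append_right _ h1)
  · exact List.mem_append_right _ h2

/-- **The reader's environment** at a call from a loop head's state. -/
theorem Head.readerEnv (h : Head u₀ g i A6 A6c Ai A pc j k s) : ReaderEnv A.2 g.frames' (g.Blk A) g.len g.f :=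
  ⟨h.loop.mid.env.live, h.loop.hand.obj.mono (callers_sub g A.2), fun hl => (h.loop.hand.inp hl).mono (callers_sub g A.2)⟩

/-- **`*f` inside one live object** (the precondition of `error`). -/
theorem Head.objLiveIn (h : Head u₀ g i A6 A6c Ai A pc j k s) : LiveIn A.2 g.frames' g.f Off.sizeof.stb_vorbis :=
  h.loop.hand.obj.mono (callers_sub g A.2)

/-- **THE TRANSPORT OVER A WALK THAT STORES SLOT `[j][k]`**: stack stores (`m1`), the store of the slot (`m2`), stack stores again. -/
theorem Head.store_between {spans1 spans2 : List Span} {pc' : Word} {s' : State} (h : Head u₀ g i A6 A6c Ai A pc j k s) (hk : k < 8)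
    (hj : j < Residue.classifications s.mem (resAt g s.mem i)) (m1 : Mem) (x : Nat)
    (hs1 : Mem.SameExcept spans1 s.mem m1) (hstk1 : ∀ w, w ∈ spans1 → Stk g w)
    (hs2 : Mem.SameExcept spans2
      (m1.writeLE (addr (Residue.residue_books s.mem (resAt g s.mem i) + 16 * j + 2 * k)) 2 x) s'.mem)
    (hstk2 : ∀ w, w ∈ spans2 → Stk g w)
    (hnew : BookOK s.mem g.f (sint16 (x % 2 ^ 16)))
    (hrip : s'.rip = pc') (hrsp : s'.reg .rsp = addr g.R) (hinv : abiInv s') :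
    Head u₀ g i A6 A6c Ai A pc' j (k + 1) s' := by
  have hfr := h.loop.frame
  -- the state with the first batch of stack stores
  have h1 : Head u₀ g i A6 A6c Ai A pc j k { s with mem := m1 } :=
    h.carry_stk (s' := { s with mem := m1 }) hs1 hstk1 hfr.rip hfr.rsp hfr.inv
  obtain ⟨eat, ecls, erb, ecnt⟩ := h.reads_eq (s' := { s with mem := m1 }) hs1 (fun w hw => (hstk1 w hw).off)
  have eat' : resAt g m1 i = resAt g s.mem i := eat
  have ecls' : Residue.classifications m1 (resAt g s.mem i) = Residue.classifications s.mem (resAt g s.mem i) := ecls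
  have erb' : Residue.residue_books m1 (resAt g s.mem i) = Residue.residue_books s.mem (resAt g s.mem i) := erb
  have ecnt' : stb_vorbis.codebook_count m1 g.f = stb_vorbis.codebook_count s.mem g.f := ecnt
  -- the state with the slot stored
  have h2 : Head u₀ g i A6 A6c Ai A pc j (k + 1)
      { s with mem := m1.writeLE (addr (Residue.residue_books s.mem (resAt g s.mem i) + 16 * j + 2 * k)) 2 x } := by
    refine Head.store
      (s' := { s with mem := m1.writeLE (addr (Residue.residue_books s.mem (resAt g s.mem i) + 16 * j + 2 * k)) 2 x })
      h1 hk ?_ x ?_ ?_ hfr.rip hfr.rsp hfr.inv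
    · show j < Residue.classifications m1 (resAt g m1 i)
      rw [eat', ecls']
      exact hj
    · show _ = m1.writeLE (addr (Residue.residue_books m1 (resAt g m1 i) + 16 * j + 2 * k)) 2 x
      rw [eat', erb']
    · unfold BookOK at hnew ⊢
      show _ ∨ (_ ∧ _ < stb_vorbis.codebook_count m1 g.f)
      rw [ecnt']
      exact hnew
  exact h2.carry_stk hs2 hstk2 hrip hrsp hinv

/-- **The address of record `i` and its `classifications` are the same after the store of a slot.** -/
theorem Head.store_eqs (h : Head u₀ g i A6 A6c Ai A pc j k s) (hk : k < 8)
    (hj : j < Residue.classifications s.mem (resAt g s.mem i)) (x : Nat) {m' : Mem}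
    (hmem : m' = s.mem.writeLE (addr (Residue.residue_books s.mem (resAt g s.mem i) + 16 * j + 2 * k)) 2 x) :
    resAt g m' i = resAt g s.mem i ∧
      Residue.classifications m' (resAt g s.mem i) = Residue.classifications s.mem (resAt g s.mem i) := by
  have hn := Nums.of_frame h.loop.frame h.loop.hand
  have hmid := h.loop.mid
  have hC : Since Ai A.1 (bookBlock g s.mem i) := h.cur.R8 (by omega)
  have ha := hmid.arena
  have hCin := arena_inside ha hC.1
  have hb := ha.bounds
  simp only [bookBlock] at hCin
  generalize hrbdef : Residue.residue_books s.mem (resAt g s.mem i) = rb at *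
  generalize hclsdef : Residue.classifications s.mem (resAt g s.mem i) = cls at *
  have ea : (addr (rb + 16 * j + 2 * k)).toNat = rb + 16 * j + 2 * k := toNat_addr _ (by omega)
  have hs : Mem.SameExcept [⟨rb + 16 * j + 2 * k, rb + 16 * j + 2 * k + 2⟩] s.mem m' := by
    rw [hmem]
    apply Mem.SameExcept.writeLE
    · rw [ea]
      omega
    · refine ⟨_, List.mem_cons_self, ?_, ?_⟩
      · rw [ea]
        exact Nat.le_refl _
      · rw [ea]
        exact Nat.le_refl _
  have hal : ∀ w, w ∈ [(⟨rb + 16 * j + 2 * k, rb + 16 * j + 2 * k + 2⟩ : Span)] → Allowed g (bookBlock g s.mem i) w := by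
    intro w hw
    rw [List.mem_singleton.mp hw]
    unfold Allowed
    simp only [bookBlock, hrbdef, hclsdef]
    omega
  have hag : Agree g Ai s.mem m' :=
    agree_allowed hn h.loop.hand ha hmid.env.ok h.loop.frame.ext h.loop.res.exti hC hs hal
  obtain ⟨eat, hrd⟩ := cur_reads h.loop.res h.cur hag.obj hag.kept h.cbB
  refine ⟨eat, ?_⟩
  rw [hrd.classifications, hclsdef]

/-- The same over a walk that stores slot `[j][k]` between stack stores. -/
theorem Head.store_between_eqs {spans1 spans2 : List Span} {s' : State} (h : Head u₀ g i A6 A6c Ai A pc j k s) (hk : k < 8)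
    (hj : j < Residue.classifications s.mem (resAt g s.mem i)) (m1 : Mem) (x : Nat)
    (hs1 : Mem.SameExcept spans1 s.mem m1) (hstk1 : ∀ w, w ∈ spans1 → Stk g w)
    (hs2 : Mem.SameExcept spans2
      (m1.writeLE (addr (Residue.residue_books s.mem (resAt g s.mem i) + 16 * j + 2 * k)) 2 x) s'.mem)
    (hstk2 : ∀ w, w ∈ spans2 → Stk g w)
    (hnew : BookOK s.mem g.f (sint16 (x % 2 ^ 16))) :
    resAt g s'.mem i = resAt g s.mem i ∧
      Residue.classifications s'.mem (resAt g s.mem i) = Residue.classifications s.mem (resAt g s.mem i) := by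
  have hfr := h.loop.frame
  have h1 : Head u₀ g i A6 A6c Ai A pc j k { s with mem := m1 } :=
    h.carry_stk (s' := { s with mem := m1 }) hs1 hstk1 hfr.rip hfr.rsp hfr.inv
  obtain ⟨eat, ecls, erb, ecnt⟩ := h.reads_eq (s' := { s with mem := m1 }) hs1 (fun w hw => (hstk1 w hw).off)
  have eat' : resAt g m1 i = resAt g s.mem i := eat
  have ecls' : Residue.classifications m1 (resAt g s.mem i) = Residue.classifications s.mem (resAt g s.mem i) := ecls
  have erb' : Residue.residue_books m1 (resAt g s.mem i) = Residue.residue_books s.mem (resAt g s.mem i) := erb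
  have ecnt' : stb_vorbis.codebook_count m1 g.f = stb_vorbis.codebook_count s.mem g.f := ecnt
  have hj1 : j < Residue.classifications m1 (resAt g m1 i) := by
    rw [eat', ecls']
    exact hj
  have hm2 : m1.writeLE (addr (Residue.residue_books s.mem (resAt g s.mem i) + 16 * j + 2 * k)) 2 x
      = m1.writeLE (addr (Residue.residue_books m1 (resAt g m1 i) + 16 * j + 2 * k)) 2 x := by
    rw [eat', erb']
  have hnew1 : BookOK m1 g.f (sint16 (x % 2 ^ 16)) := by
    unfold BookOK at hnew ⊢
    rw [ecnt']
    exact hnew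
  obtain ⟨e2, c2⟩ := Head.store_eqs (s := { s with mem := m1 }) h1 hk hj1 x hm2
  have h2 : Head u₀ g i A6 A6c Ai A pc j (k + 1)
      { s with mem := m1.writeLE (addr (Residue.residue_books s.mem (resAt g s.mem i) + 16 * j + 2 * k)) 2 x } :=
    Head.store
      (s' := { s with mem := m1.writeLE (addr (Residue.residue_books s.mem (resAt g s.mem i) + 16 * j + 2 * k)) 2 x })
      h1 hk hj1 x hm2 hnew1 hfr.rip hfr.rsp hfr.inv
  obtain ⟨e3, c3, -, -⟩ := h2.reads_eq hs2 (fun w hw => (hstk2 w hw).off)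
  have e2' : resAt g (m1.writeLE (addr (Residue.residue_books s.mem (resAt g s.mem i) + 16 * j + 2 * k)) 2 x) i
      = resAt g m1 i := e2
  have c2' : Residue.classifications
      (m1.writeLE (addr (Residue.residue_books s.mem (resAt g s.mem i) + 16 * j + 2 * k)) 2 x) (resAt g m1 i)
      = Residue.classifications m1 (resAt g m1 i) := c2
  have e3' : resAt g s'.mem i
      = resAt g (m1.writeLE (addr (Residue.residue_books s.mem (resAt g s.mem i) + 16 * j + 2 * k)) 2 x) i := e3
  have c3' : Residue.classifications s'.mem
      (resAt g (m1.writeLE (addr (Residue.residue_books s.mem (resAt g s.mem i) + 16 * j + 2 * k)) 2 x) i)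
      = Residue.classifications
        (m1.writeLE (addr (Residue.residue_books s.mem (resAt g s.mem i) + 16 * j + 2 * k)) 2 x)
        (resAt g (m1.writeLE (addr (Residue.residue_books s.mem (resAt g s.mem i) + 16 * j + 2 * k)) 2 x) i) := c3
  rw [e2', eat'] at e3' c3'
  rw [eat'] at c2'
  refine ⟨e3', ?_⟩
  rw [c3', c2', ecls']

/-- **A window of the error path**: the own stack, `f->error`, the block under construction. -/
def Calm (g : Ghost) (C : Block) (w : Span) : Prop :=
  Stk g w ∨ (g.f + 136 ≤ w.lo ∧ w.hi ≤ g.f + 144) ∨ (C.base ≤ w.lo ∧ w.hi ≤ C.base + C.size)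

/-- A window of the error path is allowed. -/
theorem Calm.allowed {g : Ghost} {C : Block} {w : Span} (h : Calm g C w) : Allowed g C w := by
  unfold Calm Stk at h
  unfold Allowed
  omega

/-- **THE TRANSPORT FOR THE ERROR EXIT**: over stack stores, a store into the block under construction and `f->error`, the
assertion WITHOUT the claim about the slots (`j = k = 0`: the slot just stored holds a bad book number). -/
theorem Head.carry0 {spans : List Span} {pc' : Word} {s' : State} (h : Head u₀ g i A6 A6c Ai A pc j k s)
    (hs : Mem.SameExcept spans s.mem s'.mem) (hcalm : ∀ w, w ∈ spans → Calm g (bookBlock g s.mem i) w)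
    (hrip : s'.rip = pc') (hrsp : s'.reg .rsp = addr g.R) (hinv : abiInv s') :
    Head u₀ g i A6 A6c Ai A pc' 0 0 s' := by
  have hn := Nums.of_frame h.loop.frame h.loop.hand
  have hmid := h.loop.mid
  have hC : Since Ai A.1 (bookBlock g s.mem i) := h.cur.R8 (by omega)
  have hag : Agree g Ai s.mem s'.mem :=
    agree_allowed hn h.loop.hand hmid.arena hmid.env.ok h.loop.frame.ext h.loop.res.exti hC hs (fun w hw => (hcalm w hw).allowed)
  have hcbB := h.cbB
  have hbits : Bits (g.Blk A) g.len s'.mem g.f := by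
    obtain ⟨n1, n2, n3, n4, n5, n6, n7⟩ := hn
    have ha := hmid.arena
    have hCin := arena_inside ha hC.1
    have hout := h.loop.hand.objOut
    simp only [Off.sizeof.stb_vorbis] at hout
    apply hmid.bits.frame_fields
    apply Bits.SameFields.of_sameExcept hs
    · intro w hw
      have := hcalm w hw
      unfold Calm Stk at this
      omega
    · intro w hw
      have := hcalm w hw
      unfold Calm Stk at this
      omega
    · intro w hw
      have := hcalm w hw
      unfold Calm Stk at this
      omega
    · intro w hw
      have := hcalm w hw
      unfold Calm Stk at this
      omega
  refine ⟨⟨?_, h.loop.hand, ?_, ?_, ?_, ?_⟩, ?_, ResBooksUpTo.zero _ _ _, Nat.zero_le _, fun h0 => absurd h0 (Nat.lt_irrefl 0)⟩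
  · exact carry_frame h.loop.frame hn hag hrip hrsp hinv
  · exact carry_mid hmid hn hag (h.loop.res.ext6.trans h.loop.res.ext6c) hbits
  · have ecount : stb_vorbis.residue_count s'.mem g.f = stb_vorbis.residue_count s.mem g.f := by
      simp only [vacc, voff]
      exact hag.obj.i32 320 (wf_mid 320 4 (by omega) (by omega))
    rw [ecount]
    exact h.loop.i_le
  · exact carry_res h.loop.res hag.obj hag.kept hcbB
  · exact carry_zero h.loop.res h.loop.zero hag.obj hag.kept
  · exact carry_cur h.loop.res h.cur hag.obj hag.kept hcbB

end Vorbis.Spec.start_decoder_R5
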